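-- pv_equiv track=rewrite | github.com/mennucc/ColDoc_project | ColDoc/utils.py | multimerge
-- ===== SOURCE A (Python) =====
-- def multimerge(sources):
--     """ `sources` is a dictionary , where each value is a list ;
--     `output` is a list of pairs (key,value) , where `key` is
--     a `key` from `strings.
--
--      This algorithm will put in `output` all elements of all lists in
--      `sources` , labelling them with `key`.
--
--      Warning: `sources` will be destroyed.
--     """
--     output = []
--     assert isinstance(sources, dict)
--     assert all(isinstance(sources[z], list) for z in sources)
--     sources = {z:sources[z] for z in sources if sources[z]}
--     while sources:
--         newsources = {}
--         for ll in sources: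
--             L = sources[ll]
--             a = L.pop(0)
--             if L:
--                 newsources[ll] = L
--             output.append( (ll , a) )
--         sources = newsources
--     return output
-- ===== SOURCE B (Python) =====
-- def multimerge(sources):
--     """Round-robin merge of a dict-of-lists into labelled (key, value) pairs.
--
--     Same contract as the original: `sources` is destroyed (its lists are
--     emptied).  This version computes the result with a single indexed double
--     loop over the rows instead of rebuilding shrinking dictionaries.
--     """
--     output = []
--     assert isinstance(sources, dict)
--     assert all(isinstance(sources[z], list) for z in sources)
--     maxlen = max((len(L) for L in sources.values()), default=0)
--     for i in range(maxlen):
--         for key, L in sources.items():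
--             if i < len(L):
--                 output.append((key, L[i]))
--     for L in sources.values():
--         L.clear()  # match the documented destruction of the input lists
--     return output
-- ===== Notes on version B (the rewrite author's own statement) =====
-- stated objective: simpler
-- what changed: B replaces A's while-loop that repeatedly rebuilds a shrinking dict of popped lists by a single indexed row/column double loop (for i in range(maxlen): take L[i] where it exists), then clears the lists once to keep the documented destruction.
import Mathlib
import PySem

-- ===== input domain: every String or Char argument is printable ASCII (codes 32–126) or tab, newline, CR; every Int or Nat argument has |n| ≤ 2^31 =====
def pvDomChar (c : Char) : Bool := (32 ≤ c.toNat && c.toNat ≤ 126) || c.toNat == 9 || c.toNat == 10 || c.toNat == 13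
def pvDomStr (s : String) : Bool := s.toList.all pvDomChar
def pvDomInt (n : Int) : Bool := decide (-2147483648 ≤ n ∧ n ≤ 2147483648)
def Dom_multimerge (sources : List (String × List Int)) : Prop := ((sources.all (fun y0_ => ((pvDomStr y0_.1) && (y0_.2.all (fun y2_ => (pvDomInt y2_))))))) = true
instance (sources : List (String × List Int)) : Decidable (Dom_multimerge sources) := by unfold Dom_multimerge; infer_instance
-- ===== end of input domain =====

-- B replaces A's repeated dict-rebuild/pop(0) round-robin loop by a single indexed
-- row/column double loop; return values proved equal (A also empties the input lists
-- in place, a side effect B reproduces in Python but which is outside this claim).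


-- ===== PORT A =====
-- one pass of A's `for ll in sources:` body: pop the head, keep the nonempty rest
-- in `newsources`, append (ll, head) to output.  The `[]` branch is unreachable in A
-- (every entry of that dict is a nonempty list; pop(0) never sees []); it is a
-- totality guard only.
def pvRowStep (st : List (String × Int) × List (String × List Int))
    (p : String × List Int) : List (String × Int) × List (String × List Int) :=
  match p.2 with
  | [] => st
  | a :: rest =>
      (st.1 ++ [(p.1, a)], if rest.isEmpty then st.2 else st.2 ++ [(p.1, rest)])

def pvMeasure (src : List (String × List Int)) : Nat :=
  (src.map (fun p => 1 + p.2.length)).sum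

-- measure lemma used by the loop's termination proof (cited in decreasing_by)
theorem pvRowStep_measure (src : List (String × List Int))
    (st : List (String × Int) × List (String × List Int)) :
    pvMeasure (src.foldl pvRowStep st).2 ≤
      pvMeasure st.2 + (src.map (fun p => p.2.length)).sum := by
  induction src generalizing st with
  | nil => simp [pvMeasure]
  | cons p src ih =>
    obtain ⟨k, L⟩ := p
    match L with
    | [] =>
      simpa [pvRowStep] using le_trans (ih st) (by simp [pvMeasure])
    | a :: rest =>
      refine le_trans (ih _) ?_
      by_cases h : rest.isEmpty
      · simp [pvRowStep, h, pvMeasure]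
      · simp [pvRowStep, h, pvMeasure]; omega

-- A's `while sources:` loop
def multimergeLoop (sources : List (String × List Int))
    (output : List (String × Int)) : List (String × Int) :=
  if sources.isEmpty then output
  else
    let st := sources.foldl pvRowStep (output, [])
    multimergeLoop st.2 st.1
termination_by pvMeasure sources
decreasing_by
  rename_i h
  simp only [List.foldl_attach]
  have hle := pvRowStep_measure sources (output, [])
  have h2 : (sources.map (fun p => p.2.length)).sum < pvMeasure sources := by
    cases sources with
    | nil => simp at h
    | cons q src => simp [pvMeasure]; omega
  simp only [pvMeasure, List.map_nil, List.sum_nil] at *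
  omega

def multimerge (sources : List (String × List Int)) : List (String × Int) :=
  multimergeLoop (sources.filter (fun p => ¬ p.2.isEmpty)) []

-- ===== PORT B =====
-- B: maxlen = max(len(L) for L in values, default 0); for i in range(maxlen):
-- for (key, L) in items: if i < len(L): output.append((key, L[i])).
def multimerge_alt (sources : List (String × List Int)) : List (String × Int) :=
  let maxlen := sources.foldl (fun m p => max m p.2.length) 0
  (List.range maxlen).flatMap (fun i =>
    sources.filterMap (fun p => (p.2[i]?).map (fun a => (p.1, a))))

-- ===== PRECONDITION & SPEC =====
-- Pre_ excludes association lists with duplicate keys: a Python dict cannot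
-- represent them (a dict literal silently keeps only the last value per key),
-- so behaviour there is an artefact of the encoding, not of A.
def Pre_multimerge (sources : List (String × List Int)) : Prop :=
  (sources.map Prod.fst).Nodup
instance (sources : List (String × List Int)) : Decidable (Pre_multimerge sources) := by
  unfold Pre_multimerge; infer_instance

def pvWitness_multimerge : (List (String × List Int)) :=
  [("a", [1, 2, 3]), ("b", [4]), ("c", [])]

def Spec_multimerge (sources : List (String × List Int)) (out : List (String × Int)) : Prop := out = multimerge_alt sources
instance (sources : List (String × List Int)) (out : List (String × Int)) : Decidable (Spec_multimerge sources out) := by unfold Spec_multimerge; infer_instance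

-- ===== CLAIM (what is proved, stated in full; the proofs are below) =====
def Claim_equal_multimerge : Prop := ∀ (sources : List (String × List Int)), Dom_multimerge sources → Pre_multimerge sources → Spec_multimerge sources (multimerge sources)

-- ===== LEMMAS AND PROOFS =====

-- one row of B's output
def pvRow (src : List (String × List Int)) (i : Nat) : List (String × Int) :=
  src.filterMap (fun p => (p.2[i]?).map (fun a => (p.1, a)))

def pvMax (src : List (String × List Int)) : Nat :=
  src.foldl (fun m p => max m p.2.length) 0

theorem multimerge_alt_eq (src : List (String × List Int)) :
    multimerge_alt src = (List.range (pvMax src)).flatMap (pvRow src) := rfl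

def pvTails (src : List (String × List Int)) : List (String × List Int) :=
  (src.map (fun p => (p.1, p.2.tail))).filter (fun p => ¬ p.2.isEmpty)

theorem foldl_pvRowStep (src : List (String × List Int))
    (out : List (String × Int)) (ns : List (String × List Int)) :
    src.foldl pvRowStep (out, ns) = (out ++ pvRow src 0, ns ++ pvTails src) := by
  induction src generalizing out ns with
  | nil => simp [pvRow, pvTails]
  | cons p src ih =>
    obtain ⟨k, L⟩ := p
    match L with
    | [] => simp [pvRowStep, pvRow, pvTails, ih]
    | [a] => simp [pvRowStep, pvRow, pvTails, ih]
    | a :: b :: t => simp [pvRowStep, pvRow, pvTails, ih]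

theorem pvMax_foldl (src : List (String × List Int)) (m : Nat) :
    src.foldl (fun m p => max m p.2.length) m =
      max m ((src.map (fun p => p.2.length)).foldr max 0) := by
  induction src generalizing m with
  | nil => simp
  | cons p src ih => simp [ih, max_assoc]

theorem foldr_max_sub_one (l : List Nat) :
    (l.map (· - 1)).foldr max 0 = l.foldr max 0 - 1 := by
  induction l with
  | nil => simp
  | cons a l ih =>
    simp only [List.map_cons, List.foldr_cons, ih]
    rcases Nat.le_total a (l.foldr max 0) with h | h <;>
      · simp only [max_def]; split_ifs <;> omega

-- filtering out empty lists changes neither the rows nor the max length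
theorem pvRow_filter (src : List (String × List Int)) (i : Nat) :
    pvRow (src.filter (fun p => ¬ p.2.isEmpty)) i = pvRow src i := by
  induction src with
  | nil => rfl
  | cons p src ih =>
    obtain ⟨k, L⟩ := p
    cases L with
    | nil =>
      rw [List.filter_cons_of_neg (by simp), ih]
      simp [pvRow]
    | cons a t =>
      rw [List.filter_cons_of_pos (by simp)]
      simp only [pvRow, List.filterMap_cons]
      simp only [pvRow] at ih
      rw [ih]

theorem pvMax_filter (src : List (String × List Int)) :
    pvMax (src.filter (fun p => ¬ p.2.isEmpty)) = pvMax src := by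
  induction src with
  | nil => rfl
  | cons p src ih =>
    obtain ⟨k, L⟩ := p
    have h := ih
    simp only [pvMax, pvMax_foldl, Nat.zero_max] at h
    cases L with
    | nil =>
      rw [List.filter_cons_of_neg (by simp)]
      simp only [pvMax, List.foldl_cons, pvMax_foldl, Nat.zero_max, List.length_nil,
        Nat.max_self]
      exact h
    | cons a t =>
      rw [List.filter_cons_of_pos (by simp)]
      simp only [pvMax, List.foldl_cons, pvMax_foldl, Nat.zero_max, List.length_cons]
      rw [h]

theorem pvMax_pvTails (src : List (String × List Int)) :
    pvMax (pvTails src) = pvMax src - 1 := by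
  unfold pvTails
  rw [pvMax_filter]
  have hmap : (src.map (fun p => ((p.1, p.2.tail) : String × List Int))).map
      (fun p => p.2.length) = (src.map (fun p => p.2.length)).map (· - 1) := by
    simp [List.map_map, Function.comp_def, List.length_tail]
  simp only [pvMax, pvMax_foldl, Nat.zero_max]
  rw [hmap, foldr_max_sub_one]

theorem pvRow_succ (src : List (String × List Int)) (i : Nat) :
    pvRow src (i + 1) = pvRow (pvTails src) i := by
  unfold pvTails
  rw [pvRow_filter]
  induction src with
  | nil => rfl
  | cons p src ih =>
    have hg : (p.2.tail)[i]? = p.2[i + 1]? := by cases p.2 <;> simp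
    simp only [pvRow, List.map_cons, List.filterMap_cons, hg] at ih ⊢
    cases h : p.2[i + 1]? <;> simp [← ih]

theorem pvRow_of_max_zero (src : List (String × List Int))
    (h : pvMax src = 0) (i : Nat) : pvRow src i = [] := by
  induction src with
  | nil => rfl
  | cons p src ih =>
    rw [pvMax, List.foldl_cons, pvMax_foldl] at h
    have hp : p.2.length = 0 ∧ (src.map (fun p => p.2.length)).foldr max 0 = 0 := by
      constructor <;> omega
    have h2 : pvMax src = 0 := by rw [pvMax, pvMax_foldl]; omega
    have hnil : p.2 = [] := List.eq_nil_of_length_eq_zero hp.1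
    have hstep : pvRow (p :: src) i = pvRow src i := by
      simp only [pvRow, List.filterMap_cons, hnil, List.getElem?_nil, Option.map_none]
    rw [hstep]
    exact ih h2

theorem alt_split (src : List (String × List Int)) :
    (List.range (pvMax src)).flatMap (pvRow src) =
      pvRow src 0 ++ (List.range (pvMax (pvTails src))).flatMap (pvRow (pvTails src)) := by
  rw [pvMax_pvTails]
  cases h : pvMax src with
  | zero =>
    simp [pvRow_of_max_zero src h 0]
  | succ n =>
    rw [List.range_succ_eq_map]
    simp only [List.flatMap_cons, List.flatMap_map, Nat.add_sub_cancel]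
    congr 1
    exact List.flatMap_congr (fun i _ => pvRow_succ src i)

theorem multimergeLoop_eq (src : List (String × List Int)) (out : List (String × Int)) :
    multimergeLoop src out = out ++ (List.range (pvMax src)).flatMap (pvRow src) := by
  induction src, out using multimergeLoop.induct with
  | case1 src out h =>
    have : src = [] := List.isEmpty_iff.mp h
    subst this
    simp [multimergeLoop, pvMax]
  | case2 src out h st ih =>
    have hst : st = (out ++ pvRow src 0, pvTails src) := by
      simp only [st, List.foldl_attach, foldl_pvRowStep, List.nil_append]
    rw [hst] at ih
    dsimp only at ih
    rw [multimergeLoop.eq_def, if_neg h]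
    show multimergeLoop (List.foldl pvRowStep (out, []) src).2
        (List.foldl pvRowStep (out, []) src).1 = _
    rw [foldl_pvRowStep]
    dsimp only
    simp only [List.nil_append]
    rw [ih]
    conv_rhs => rw [alt_split]
    rw [List.append_assoc]

-- ===== VERDICT (by name: the statement is the Claim_ definition above) =====
theorem multimerge_spec : Claim_equal_multimerge := by
  intro src _ _
  unfold Spec_multimerge multimerge
  rw [multimergeLoop_eq, multimerge_alt_eq]
  simp only [List.nil_append]
  rw [pvMax_filter]
  congr 1
  funext i
  exact (pvRow_filter src i)
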